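-- pv_equiv track=rewrite | github.com/mcfee-618/FluentAlgorithm | other/PartitionLabels.py | compareSet
-- ===== SOURCE A (Python) =====
-- def compareSet(str1: str, str2: str) -> bool:
--     set1 = set()
--     set2 = set()
--     for ch in str1:
--         set1.add(ch)
--     for ch in str2:
--         set2.add(ch)
--     return len(set1.intersection(set2)) == 0
-- ===== SOURCE B (Python) =====
-- def compareSet(str1: str, str2: str) -> bool:
--     seen = set(str1)
--     for ch in str2:
--         if ch in seen:
--             return False
--     return True
-- ===== Notes on version B (the rewrite author's own statement) =====
-- stated objective: simpler
-- what changed: Builds one set from str1 and scans str2 with an early-exit membership loop, instead of building two sets and materializing their intersection.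
import Mathlib
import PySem

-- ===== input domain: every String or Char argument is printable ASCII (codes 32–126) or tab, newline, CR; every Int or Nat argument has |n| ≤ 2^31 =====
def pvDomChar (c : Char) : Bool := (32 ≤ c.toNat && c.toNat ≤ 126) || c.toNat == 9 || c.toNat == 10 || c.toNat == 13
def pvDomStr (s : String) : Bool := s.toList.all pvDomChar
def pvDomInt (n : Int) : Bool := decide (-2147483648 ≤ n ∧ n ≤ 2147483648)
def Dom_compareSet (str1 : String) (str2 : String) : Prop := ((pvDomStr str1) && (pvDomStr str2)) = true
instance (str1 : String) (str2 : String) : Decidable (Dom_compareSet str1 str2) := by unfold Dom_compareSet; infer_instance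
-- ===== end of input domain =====

-- B replaces A's two-set-build-plus-intersection with one set from str1 and an early-exit membership scan over str2 (objective: simpler).

-- ===== PORT A =====
def compareSet (str1 : String) (str2 : String) : Bool :=
  let set1 : PySem.Set Char := str1.toList.foldl PySem.Set.add PySem.Set.empty
  let set2 : PySem.Set Char := str2.toList.foldl PySem.Set.add PySem.Set.empty
  PySem.Set.len (PySem.Set.inter set1 set2) == 0

-- ===== PORT B =====
-- early-exit scan: 'for ch in str2: if ch in seen: return False'
def compareSetScan (seen : PySem.Set Char) : List Char → Bool
  | [] => true
  | ch :: rest => if PySem.Set.contains seen ch then false else compareSetScan seen rest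

def compareSet_alt (str1 : String) (str2 : String) : Bool :=
  let seen : PySem.Set Char := PySem.Set.ofList str1.toList
  compareSetScan seen str2.toList

-- ===== PRECONDITION & SPEC =====
def Spec_compareSet (str1 : String) (str2 : String) (out : Bool) : Prop := out = compareSet_alt str1 str2
instance (str1 : String) (str2 : String) (out : Bool) : Decidable (Spec_compareSet str1 str2 out) := by unfold Spec_compareSet; infer_instance

-- ===== CLAIM (what is proved, stated in full; the proofs are below) =====
def Claim_equal_compareSet : Prop := ∀ (str1 : String) (str2 : String), Dom_compareSet str1 str2 → Spec_compareSet str1 str2 (compareSet str1 str2)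

-- ===== LEMMAS AND PROOFS =====

theorem compareSetScan_eq_all (seen : PySem.Set Char) (l : List Char) :
    compareSetScan seen l = l.all (fun c => !PySem.Set.contains seen c) := by
  induction l with
  | nil => rfl
  | cons ch rest ih =>
      simp only [compareSetScan, List.all_cons, ih]
      cases PySem.Set.contains seen ch <;> simp

theorem compareSet_eq_alt (str1 str2 : String) :
    compareSet str1 str2 = compareSet_alt str1 str2 := by
  unfold compareSet compareSet_alt
  rw [compareSetScan_eq_all]
  show (((str1.toList.foldl PySem.Set.add PySem.Set.empty).inter (str2.toList.foldl PySem.Set.add PySem.Set.empty)).len == 0) = _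
  rw [show (PySem.Set.empty : PySem.Set Char) = [] from rfl, ← PySem.Set.ofList_eq_foldl, ← PySem.Set.ofList_eq_foldl]
  by_cases hd : ∀ c ∈ str2.toList, PySem.Set.contains (PySem.Set.ofList str1.toList) c = false
  · -- no common character: intersection is empty and the scan accepts all
    have hnil : PySem.Set.inter (PySem.Set.ofList str1.toList) (PySem.Set.ofList str2.toList) = [] := by
      rw [List.eq_nil_iff_forall_not_mem]
      intro c hc
      have hc' := (PySem.Set.mem_inter _ _ _).mp hc
      have h2 : c ∈ str2.toList := (PySem.Set.mem_ofList _ _).mp hc'.2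
      have := hd c h2
      rw [Bool.eq_false_iff] at this
      exact this ((PySem.Set.contains_iff _ _).mpr hc'.1)
    rw [hnil]
    have hall : str2.toList.all (fun c => !(PySem.Set.ofList str1.toList).contains c) = true := by
      simp only [List.all_eq_true, Bool.not_eq_true']
      exact hd
    rw [hall]
    decide
  · -- a common character exists: intersection nonempty, scan rejects
    push Not at hd
    rcases hd with ⟨c, hc2, hc1⟩
    rw [Bool.ne_false_iff] at hc1
    have hmem : c ∈ PySem.Set.inter (PySem.Set.ofList str1.toList) (PySem.Set.ofList str2.toList) :=
      (PySem.Set.mem_inter _ _ _).mpr ⟨(PySem.Set.contains_iff _ _).mp hc1, (PySem.Set.mem_ofList _ _).mpr hc2⟩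
    have hne : PySem.Set.inter (PySem.Set.ofList str1.toList) (PySem.Set.ofList str2.toList) ≠ [] := by
      intro h0; rw [h0] at hmem; exact absurd hmem (List.not_mem_nil)
    have hlen : (PySem.Set.len (PySem.Set.inter (PySem.Set.ofList str1.toList) (PySem.Set.ofList str2.toList)) == 0) = false := by
      simp [PySem.Set.len, List.length_eq_zero_iff, hne]
    rw [hlen, eq_comm]
    simp only [List.all_eq_true, Bool.not_eq_true', Bool.eq_false_iff, ne_eq]
    intro hall
    exact hall c hc2 hc1

-- ===== VERDICT (by name: the statement is the Claim_ definition above) =====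
theorem compareSet_spec : Claim_equal_compareSet := by
  intro str1 str2 _
  unfold Spec_compareSet
  exact compareSet_eq_alt str1 str2
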